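-- pv_equiv track=rewrite | github.com/ElsaLopez133/stm32wba55-crypto | src/bin/montgomery-python.py | generate_r2
-- ===== SOURCE A (Python) =====
-- import math
--
-- def generate_r2(n):
--     n = int(n)
--     k = n.bit_length()
--     w = int(math.ceil(k/32))
--     R = 2**(32*w)
--     r2adj = 2**(w*32-k)
--     Z = R - n*r2adj
--
--     for i in range(0, w+2):
--         Z = Z << 32
--         MSW = (Z >> w*32) & (2**32-1)
--         while (MSW != 0):
--             Z = Z - (n * MSW * r2adj)
--             MSW = (Z >> w*32) & (2**32-1)
--
--     return (Z)
-- ===== SOURCE B (Python) =====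
-- def generate_r2(n):
--     # Closed form: the loop of A computes the unique representative of
--     # 2**(32*(2w+2)) mod (n<<(32w-k)) lying in [R-M, R); compute it directly.
--     n = int(n)
--     k = n.bit_length()
--     w = (k + 31) // 32
--     R = 2 ** (32 * w)
--     M = n * 2 ** (32 * w - k)
--     V = 2 ** (32 * (2 * w + 2))
--     if M == 0:
--         return V
--     low = R - M
--     return (V - low) % M + low
-- ===== Notes on version B (the rewrite author's own statement) =====
-- stated objective: simpler
-- what changed: replaces A's word-by-word shift-and-subtract reduction loop (nested for/while) by a single closed-form modular reduction picking the representative of 2^(32(2w+2)) mod n*2^(32w-k) in [R-M, R)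
import Mathlib
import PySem

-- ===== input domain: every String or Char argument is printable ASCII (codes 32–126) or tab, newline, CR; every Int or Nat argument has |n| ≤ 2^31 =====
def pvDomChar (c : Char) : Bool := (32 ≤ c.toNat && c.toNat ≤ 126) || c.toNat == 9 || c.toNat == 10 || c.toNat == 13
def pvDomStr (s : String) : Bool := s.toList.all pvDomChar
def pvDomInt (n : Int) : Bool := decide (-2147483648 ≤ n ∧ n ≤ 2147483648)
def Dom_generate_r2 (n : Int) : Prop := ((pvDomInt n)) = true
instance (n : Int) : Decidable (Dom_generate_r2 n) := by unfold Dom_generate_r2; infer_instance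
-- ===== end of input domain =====

-- B replaces A's word-by-word shift-and-subtract reduction loop by one closed-form
-- modular reduction; return-value equivalence is claimed for n ≥ 0 (on n < 0 A's loop never returns).

-- ===== PORT A =====
-- Python's unbounded 'while MSW != 0' ported with a fuel counter (totalizing guard only;
-- the proof shows the fuel chosen in pvOuterA is never exhausted on Pre_).
def pvInnerA (n r2adj : Int) (w : Nat) : Nat → Int → Int
  | 0, Z => Z
  | fuel+1, Z =>
    if PySem.Int.band (Z >>> (w*32)) (2^32-1) ≠ 0 then
      pvInnerA n r2adj w fuel (Z - n * PySem.Int.band (Z >>> (w*32)) (2^32-1) * r2adj)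
    else Z

-- one iteration of the 'for i in range(0, w+2)' body: Z = Z << 32, then the while loop
def pvOuterA (n r2adj : Int) (w : Nat) (Z : Int) : Int :=
  pvInnerA n r2adj w ((Z <<< (32:Nat)).toNat + 1) (Z <<< (32:Nat))

def generate_r2 (n : Int) : Int :=
  let k := PySem.Int.bitLength n
  -- w = int(math.ceil(k/32)) ported as Nat ceiling division: exact, since k ≤ 32 on Dom
  let w : Nat := (k + 31) / 32
  let R : Int := 2 ^ (32 * w)
  -- w*32 - k : Nat subtraction; w*32 ≥ k always holds since w = ceil(k/32), so this is exact
  let r2adj : Int := 2 ^ (w * 32 - k)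
  let Z := R - n * r2adj
  (PySem.List.pyRange 0 ((w : Int) + 2) 1).foldl (fun Z _ => pvOuterA n r2adj w Z) Z

-- ===== PORT B =====
def generate_r2_alt (n : Int) : Int :=
  let k := PySem.Int.bitLength n
  let w : Nat := (k + 31) / 32
  let R : Int := 2 ^ (32 * w)
  let M : Int := n * 2 ^ (32 * w - k)
  let V : Int := 2 ^ (32 * (2 * w + 2))
  if M = 0 then V
  else PySem.Int.mod (V - (R - M)) M + (R - M)

-- ===== PRECONDITION & SPEC =====
-- Pre_ excludes n < 0, on which Python A's inner while loop never terminates (A returns no value there).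
def Pre_generate_r2 (n : Int) : Prop := 0 ≤ n
instance (n : Int) : Decidable (Pre_generate_r2 n) := by unfold Pre_generate_r2; infer_instance
def pvWitness_generate_r2 : Int := (7)

def Spec_generate_r2 (n : Int) (out : Int) : Prop := out = generate_r2_alt n
instance (n : Int) (out : Int) : Decidable (Spec_generate_r2 n out) := by unfold Spec_generate_r2; infer_instance

-- ===== CLAIM (what is proved, stated in full; the proofs are below) =====
def Claim_equal_generate_r2 : Prop := ∀ (n : Int), Dom_generate_r2 n → Pre_generate_r2 n → Spec_generate_r2 n (generate_r2 n)

-- ===== LEMMAS AND PROOFS =====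

-- The inner while loop, for w = 1 and a modulus M = n*r2adj with 2^31 ≤ M < 2^32,
-- returns the unique representative of Z mod M in [2^32 - M, 2^32).
lemma pv_inner_eq (n r2adj M : Int) (hM : n * r2adj = M)
    (hlo : 2^31 ≤ M) (hhi : M < 2^32) :
    ∀ (fuel : Nat) (Z : Int), 2^32 - M ≤ Z → Z < 2^64 → Z.toNat < fuel →
      pvInnerA n r2adj 1 fuel Z = (Z - (2^32 - M)) % M + (2^32 - M) := by
  intro fuel
  induction fuel with
  | zero => intro Z _ _ h; omega
  | succ fuel ih =>
    intro Z hZlo hZhi hfuel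
    have hZ0 : 0 ≤ Z := by omega
    have hq : Z >>> (1*32 : Nat) = Z / 2^32 := by
      rw [show (1*32 : Nat) = 32 from rfl]; exact Int.shiftRight_eq_div_pow Z 32
    have hband : PySem.Int.band (Z >>> (1*32 : Nat)) (2^32-1) = Z / 2^32 := by
      rw [hq, PySem.Int.band_of_nonneg (by omega) (by norm_num)]
      have h2 : (2^32-1 : Int).toNat = 2^32-1 := by decide
      have h3 : (Z / 2^32).toNat &&& (2^32-1 : Int).toNat = (Z / 2^32).toNat := by
        rw [h2, Nat.and_two_pow_sub_one_eq_mod, Nat.mod_eq_of_lt (by omega)]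
      omega
    rw [pvInnerA, hband]
    by_cases hq0 : Z / 2^32 = 0
    · rw [if_neg (by simpa using hq0)]
      have h1 : Z < 2^32 := by omega
      rw [Int.emod_eq_of_lt (by omega) (by omega)]
      omega
    · rw [if_pos (by simpa using hq0)]
      have hq1 : 1 ≤ Z / 2^32 := by omega
      have hqZ : 2^32 * (Z / 2^32) ≤ Z := by omega
      have he : n * (Z / 2^32) * r2adj = M * (Z / 2^32) := by rw [← hM]; ring
      rw [he]
      have h1 : (2^32 - M) * 1 ≤ (2^32 - M) * (Z / 2^32) :=
        mul_le_mul_of_nonneg_left hq1 (by omega)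
      have h2 : M * 1 ≤ M * (Z / 2^32) := mul_le_mul_of_nonneg_left hq1 (by omega)
      have e2 : (2^32 - M) * (Z / 2^32) = 2^32 * (Z / 2^32) - M * (Z / 2^32) := by ring
      have hZ'lo : 2^32 - M ≤ Z - M * (Z / 2^32) := by linarith
      have hZ'hi : Z - M * (Z / 2^32) < 2^64 := by linarith
      have hZ'f : (Z - M * (Z / 2^32)).toNat < fuel := by
        have : Z - M * (Z / 2^32) + 1 ≤ Z := by linarith
        omega
      rw [ih _ hZ'lo hZ'hi hZ'f]
      rw [show Z - M * (Z / 2^32) - (2^32 - M) = (Z - (2^32 - M)) - M * (Z / 2^32) from by ring,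
        Int.sub_mul_emod_self_left]

-- one outer-loop iteration in closed form
lemma pv_outer_eq (n r2adj M : Int) (hM : n * r2adj = M)
    (hlo : 2^31 ≤ M) (hhi : M < 2^32) (Z : Int)
    (hZlo : 2^32 - M ≤ Z) (hZhi : Z < 2^32) :
    pvOuterA n r2adj 1 Z = (Z * 2^32 - (2^32 - M)) % M + (2^32 - M) := by
  unfold pvOuterA
  rw [show Z <<< (32:Nat) = Z * 2^32 from Int.shiftLeft_eq Z 32]
  have hZ1 : 1 ≤ Z := by omega
  have h1 : 1 * 2^32 ≤ Z * 2^32 := mul_le_mul_of_nonneg_right hZ1 (by norm_num)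
  have h2 : Z * 2^32 ≤ (2^32 - 1) * 2^32 := mul_le_mul_of_nonneg_right (by omega) (by norm_num)
  exact pv_inner_eq n r2adj M hM hlo hhi _ _ (by linarith) (by linarith) (by omega)

-- feeding a representative back through '· * 2^32' does not change the residue
lemma pv_step_mod (M L a : Int) :
    (((a - L) % M + L) * 2^32 - L) % M = (a * 2^32 - L) % M := by
  have e : ((a - L) % M + L) * 2^32 - L
      = (a * 2^32 - L) - M * ((a - L) / M * 2^32) := by
    rw [Int.emod_def]; ring
  rw [e, Int.sub_mul_emod_self_left]

theorem generate_r2_spec : Claim_equal_generate_r2 := by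
  intro n hdom hpre
  unfold Spec_generate_r2
  by_cases hn0 : n = 0
  · subst hn0; decide
  -- main case: 1 ≤ n ≤ 2^31
  have hdom' : n ≤ 2147483648 := by
    unfold Dom_generate_r2 pvDomInt at hdom; simp at hdom; exact hdom.2
  have hn1 : 1 ≤ n := by unfold Pre_generate_r2 at hpre; omega
  set k := PySem.Int.bitLength n with hk
  have hna : (n.natAbs : Int) = n := Int.natAbs_of_nonneg (by omega)
  have hlt := PySem.Int.lt_two_pow_bitLength n
  rw [← hk] at hlt
  have hk1 : 1 ≤ k := by
    by_contra h
    have hk0 : k = 0 := by omega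
    rw [hk0] at hlt; simp at hlt; omega
  have hge := PySem.Int.two_pow_bitLength_le n (by omega)
  rw [← hk] at hge
  have hk32 : k ≤ 32 := by
    by_contra h
    have h1 : 2^32 ≤ 2^(k-1) := Nat.pow_le_pow_right (by norm_num) (by omega)
    have h2 : (2:Nat)^32 ≤ n.natAbs := le_trans h1 hge
    omega
  have hn_ge : (2:Int)^(k-1) ≤ n := by rw [← hna]; exact_mod_cast hge
  have hn_lt : n < (2:Int)^k := by rw [← hna]; exact_mod_cast hlt
  have hw : (k + 31) / 32 = 1 := by omega
  -- bounds on the effective modulus M = n * 2^(32-k)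
  set M : Int := n * 2 ^ (32 - k) with hMdef
  have hpow_pos : (0:Int) < 2 ^ (32 - k) := by positivity
  have hlo : 2^31 ≤ M := by
    have e : (2:Int)^(k-1) * 2^(32-k) = 2^31 := by
      rw [← pow_add]; congr 1; omega
    calc (2:Int)^31 = 2^(k-1) * 2^(32-k) := e.symm
      _ ≤ n * 2^(32-k) := mul_le_mul_of_nonneg_right hn_ge (by positivity)
  have hhi : M < 2^32 := by
    have e : (2:Int)^k * 2^(32-k) = 2^32 := by rw [← pow_add]; congr 1; omega
    calc M < 2^k * 2^(32-k) := mul_lt_mul_of_pos_right hn_lt hpow_pos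
      _ = 2^32 := e
  have hlo' : (2147483648:Int) ≤ M := by norm_num at hlo; exact hlo
  have hhi' : M < 4294967296 := by norm_num at hhi; exact hhi
  have hM0 : M ≠ 0 := by omega
  have hMpos : (0:Int) < M := by omega
  -- reduce port B to its closed form with M folded in
  have hB : generate_r2_alt n
      = (2^128 - (2^32 - M)) % M + (2^32 - M) := by
    simp only [generate_r2_alt, ← hk, hw, show (32*1 : Nat) = 32 from by norm_num,
      show (32*(2*1+2) : Nat) = 128 from by norm_num, ← hMdef]
    rw [if_neg hM0, PySem.Int.mod_eq_emod_of_pos hMpos]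
  -- reduce port A: three applications of the closed form of one outer iteration
  have hrange : PySem.List.pyRange 0 ((1:Int) + 2) 1 = [0, 1, 2] := by decide
  have hMeq : n * 2 ^ (32 - k) = M := hMdef.symm
  simp only [generate_r2, ← hk, hw, show (32*1 : Nat) = 32 from by norm_num,
    Nat.cast_one, ← hMdef]
  rw [hrange]
  simp only [List.foldl]
  have hL1 : (1:Int) ≤ 2^32 - M := by norm_num; omega
  have hL2 : (2:Int)^32 - M < 2^32 := by norm_num; omega
  rw [pv_outer_eq n _ M hMeq hlo hhi (2^32 - M) (le_refl _) hL2]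
  set Z1 : Int := ((2^32 - M) * 2^32 - (2^32 - M)) % M + (2^32 - M) with hZ1
  have hr1a := Int.emod_nonneg ((2^32 - M) * 2^32 - (2^32 - M)) hM0
  have hr1b := Int.emod_lt_of_pos ((2^32 - M) * 2^32 - (2^32 - M)) hMpos
  have hZ1lo : 2^32 - M ≤ Z1 := by rw [hZ1]; linarith
  have hZ1hi : Z1 < 2^32 := by rw [hZ1]; linarith
  rw [pv_outer_eq n _ M hMeq hlo hhi Z1 hZ1lo hZ1hi]
  set Z2 : Int := (Z1 * 2^32 - (2^32 - M)) % M + (2^32 - M) with hZ2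
  have hr2a := Int.emod_nonneg (Z1 * 2^32 - (2^32 - M)) hM0
  have hr2b := Int.emod_lt_of_pos (Z1 * 2^32 - (2^32 - M)) hMpos
  have hZ2lo : 2^32 - M ≤ Z2 := by rw [hZ2]; linarith
  have hZ2hi : Z2 < 2^32 := by rw [hZ2]; linarith
  rw [pv_outer_eq n _ M hMeq hlo hhi Z2 hZ2lo hZ2hi, hB]
  -- pure modular arithmetic: (Z2*2^32 - L) % M = (2^128 - L) % M for L = 2^32 - M
  have c1 : (Z1 * 2^32 - (2^32 - M)) % M
      = ((2^32 - M) * 2^64 - (2^32 - M)) % M := by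
    rw [hZ1, pv_step_mod M (2^32 - M) ((2^32 - M) * 2^32),
      show ((2:Int)^32 - M) * 2^32 * 2^32 = (2^32 - M) * 2^64 from by ring]
  have c2 : (Z2 * 2^32 - (2^32 - M)) % M
      = ((2^32 - M) * 2^96 - (2^32 - M)) % M := by
    rw [hZ2, c1, pv_step_mod M (2^32 - M) ((2^32 - M) * 2^64),
      show ((2:Int)^32 - M) * 2^64 * 2^32 = (2^32 - M) * 2^96 from by ring]
  have c3 : ((2^32 - M) * 2^96 - (2^32 - M)) % M
      = ((2:Int)^128 - (2^32 - M)) % M := by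
    rw [show ((2:Int)^32 - M) * 2^96 - (2^32 - M)
        = (2^128 - (2^32 - M)) - M * 2^96 from by ring,
      Int.sub_mul_emod_self_left]
  rw [c2, c3]
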